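-- pv_equiv track=rewrite | github.com/elemel/advent-of-code-2018 | 2018/12/08/part_2.py | solve
-- ===== SOURCE A (Python) =====
-- def solve(node):
--     child_count = node.pop()
--     metadata_count = node.pop()
--
--     if not child_count:
--         return sum(node.pop() for _ in range(metadata_count))
--
--     child_values = [solve(node) for _ in range(child_count)]
--     metadata_entries = [node.pop() for _ in range(metadata_count)]
--
--     return sum(
--         child_values[i - 1]
--         for i in metadata_entries
--         if 1 <= i <= len(child_values))
-- ===== SOURCE B (Python) =====
-- # Iterative rewrite: an explicit stack of frames instead of recursion; reads the
-- # license back-to-front with an index and mutates `node` like the original.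
-- def solve(node):
--     data = node[::-1]          # the order in which the license is consumed
--     pos = 0
--     stack = []                 # frames: [child count, metadata count, collected child values]
--     while True:
--         stack.append([data[pos], data[pos + 1], []])
--         pos += 2
--         while len(stack[-1][2]) >= stack[-1][0]:   # all requested children collected
--             count, meta, values = stack.pop()
--             entries = []
--             for _ in range(meta):
--                 entries.append(data[pos])
--                 pos += 1
--             if count == 0:
--                 total = sum(entries)
--             else:
--                 total = sum(values[i - 1] for i in entries if 1 <= i <= len(values))
--             if not stack:
--                 del node[len(node) - pos:]
--                 return total
--             stack[-1][2].append(total)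
-- ===== Notes on version B (the rewrite author's own statement) =====
-- stated objective: alternative
-- what changed: A's recursive descent is replaced by an iterative explicit stack of frames (the node's header plus its collected child values, a frame completing once it holds as many child values as its header requested) that reads the license back-to-front with an index; Pre_ excludes only the inputs on which A's pops exhaust the list (A raises IndexError, and so does B).
import Mathlib
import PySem

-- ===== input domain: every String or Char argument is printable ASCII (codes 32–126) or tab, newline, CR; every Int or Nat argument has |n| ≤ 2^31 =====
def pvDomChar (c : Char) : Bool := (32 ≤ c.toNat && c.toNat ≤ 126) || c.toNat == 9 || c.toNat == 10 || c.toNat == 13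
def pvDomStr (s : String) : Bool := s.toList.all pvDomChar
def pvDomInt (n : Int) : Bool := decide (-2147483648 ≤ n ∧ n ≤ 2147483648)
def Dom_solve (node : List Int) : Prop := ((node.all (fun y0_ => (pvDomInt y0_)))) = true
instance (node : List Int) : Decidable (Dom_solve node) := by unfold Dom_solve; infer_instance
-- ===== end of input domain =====

-- B replaces A's recursion by an explicit stack of frames (alternative decomposition, same cost);
-- inside Pre_ both A and B mutate `node` identically in Python — the equivalence proved is about the return value.

-- ===== PORT A =====
-- sum(node.pop() for _ in range(k)) : pops from the end, accumulating the sum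
def popSumA : Nat → List Int → Int → Option (Int × List Int)
  | 0, xs, acc => some (acc, xs)
  | k+1, xs, acc =>
    match PySem.List.pop? xs with
    | none => none
    | some (v, xs') => popSumA k xs' (acc + v)

-- [node.pop() for _ in range(k)]
def popListA : Nat → List Int → Option (List Int × List Int)
  | 0, xs => some ([], xs)
  | k+1, xs =>
    match PySem.List.pop? xs with
    | none => none
    | some (v, xs') =>
      match popListA k xs' with
      | none => none
      | some (l, r) => some (v :: l, r)

mutual
-- A's recursion; the fuel only makes the recursion total (it never bites on Pre_ inputs);
-- `none` marks the IndexError of pop() on an exhausted list.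
def solveA : Nat → List Int → Option (Int × List Int)
  | 0, _ => none
  | fuel+1, xs =>
    match PySem.List.pop? xs with
    | none => none
    | some (child_count, xs1) =>
      match PySem.List.pop? xs1 with
      | none => none
      | some (metadata_count, xs2) =>
        if child_count = 0 then
          popSumA metadata_count.toNat xs2 0
        else
          match childrenA fuel child_count.toNat xs2 with
          | none => none
          | some (child_values, xs3) =>
            match popListA metadata_count.toNat xs3 with
            | none => none
            | some (metadata_entries, xs4) =>
              -- the guard 1 <= i <= len(child_values) makes the index i-1 in range, so getD is exact
              some (metadata_entries.foldl
                (fun acc i =>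
                  if 1 ≤ i ∧ i ≤ (child_values.length : Int) then
                    acc + child_values.getD (i - 1).toNat 0
                  else acc) 0, xs4)
  termination_by fuel _ => (fuel, 0, 0)
-- [solve(node) for _ in range(child_count)]
def childrenA : Nat → Nat → List Int → Option (List Int × List Int)
  | _, 0, xs => some ([], xs)
  | fuel, k+1, xs =>
    match solveA fuel xs with
    | none => none
    | some (v, xs') =>
      match childrenA fuel k xs' with
      | none => none
      | some (vs, xs'') => some (v :: vs, xs'')
  termination_by fuel k _ => (fuel, 1, k)
end

def solve (node : List Int) : Int :=
  match solveA (node.length + 1) node with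
  | some (v, _) => v
  | none => 0    -- unreachable under Pre_solve (A raises there)

-- ===== PORT B =====
-- frame = [child count, metadata count, collected child values]
abbrev FrameB := Int × Int × List Int

-- `sum(entries) if count == 0 else sum(values[i-1] for i in entries if 1 <= i <= len(values))`
def metaValB (c : Int) (vals entries : List Int) : Int :=
  if c = 0 then entries.foldl (fun acc e => acc + e) 0
  else entries.foldl
    (fun acc i =>
      if 1 ≤ i ∧ i ≤ (vals.length : Int) then acc + vals.getD (i - 1).toNat 0
      else acc) 0

-- `for _ in range(meta): entries.append(data[pos]); pos += 1` on the unread suffix `rest` of `data`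
-- (`none` marks the IndexError of reading past `data`; range of a negative count is empty)
def readEntB : Nat → List Int → Option (List Int × List Int)
  | 0, rest => some ([], rest)
  | k+1, rest =>
    match rest with
    | [] => none
    | e :: r =>
      match readEntB k r with
      | none => none
      | some (l, r') => some (e :: l, r')

-- the inner `while len(stack[-1][2]) >= stack[-1][0]` loop: finish nodes whose requested
-- children are all collected, unwinding the stack
def completeB : FrameB → List Int → List FrameB → Option (Int ⊕ (FrameB × List Int × List FrameB))
  | (c, m, vals), rest, stack =>
    if c ≤ (vals.length : Int) then
      match readEntB m.toNat rest with
      | none => none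
      | some (entries, r') =>
        match stack with
        | [] => some (.inl (metaValB c vals entries))
        | (pc, pm, pvals) :: s => completeB (pc, pm, pvals ++ [metaValB c vals entries]) r' s
    else some (.inr ((c, m, vals), rest, stack))

-- the outer `while True` loop: read a header, push a frame; fuel only makes it total
-- (`none` marks the IndexError of reading past `data`)
def runB : Nat → List Int → List FrameB → Option Int
  | 0, _, _ => none
  | fuel+1, rest, stack =>
    match rest with
    | c :: m :: r2 =>
      match completeB (c, m, []) r2 stack with
      | none => none
      | some (.inl v) => some v
      | some (.inr (f, r, s)) => runB fuel r (f :: s)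
    | _ => none

def solve_alt (node : List Int) : Int :=
  (runB (node.length + 1) node.reverse []).getD 0    -- getD unreachable under Pre_solve

-- ===== PRECONDITION & SPEC =====
-- k nodes in a row, checked by `st`
def scanFWith (st : List Int → Option (List Int)) : Nat → List Int → Option (List Int)
  | 0, xs => some xs
  | k+1, xs =>
    match st xs with
    | none => none
    | some xs' => scanFWith st k xs'

-- grammar checker for the license format, read back-to-front: a header c, m, then max(c,0)
-- children and max(m,0) metadata entries (a shape condition on the input; it computes no values)
def scanT : Nat → List Int → Option (List Int)
  | 0, _ => none
  | fuel+1, xs =>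
    match xs with
    | c :: m :: xs2 =>
      match scanFWith (scanT fuel) c.toNat xs2 with
      | none => none
      | some xs3 => if m.toNat ≤ xs3.length then some (xs3.drop m.toNat) else none
    | _ => none

-- Pre_solve excludes exactly the inputs on which A's pops hit an empty list (A raises IndexError
-- there, and so does B): node, read back-to-front (the order in which A pops), must start with
-- one complete node of the license grammar.
def Pre_solve (node : List Int) : Prop := (scanT (node.length + 1) node.reverse).isSome = true
instance (node : List Int) : Decidable (Pre_solve node) := by unfold Pre_solve; infer_instance

def pvWitness_solve : List Int := [5, 1, 0]

def Spec_solve (node : List Int) (out : Int) : Prop := out = solve_alt node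
instance (node : List Int) (out : Int) : Decidable (Spec_solve node out) := by unfold Spec_solve; infer_instance

-- ===== CLAIM (what is proved, stated in full; the proofs are below) =====
def Claim_equal_solve : Prop := ∀ (node : List Int), Dom_solve node → Pre_solve node → Spec_solve node (solve node)

-- ===== LEMMAS AND PROOFS =====

-- license trees: the common denotation both ports compute
mutual
inductive PTree : Type
  | mk : Int → Int → PForest → List Int → PTree
inductive PForest : Type
  | nil : PForest
  | cons : PTree → PForest → PForest
end

mutual
def encT : PTree → List Int
  | .mk c m ch md => c :: m :: (encF ch ++ md)
def encF : PForest → List Int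
  | .nil => []
  | .cons t f => encT t ++ encF f
end

def lenF : PForest → Nat
  | .nil => 0
  | .cons _ f => lenF f + 1

mutual
def valT : PTree → Int
  | .mk c _ ch md =>
    if c = 0 then md.foldl (fun acc e => acc + e) 0
    else md.foldl
      (fun acc i =>
        if 1 ≤ i ∧ i ≤ ((valsF ch).length : Int) then acc + (valsF ch).getD (i - 1).toNat 0
        else acc) 0
def valsF : PForest → List Int
  | .nil => []
  | .cons t f => valT t :: valsF f
end

mutual
def nT : PTree → Nat
  | .mk _ _ ch _ => nF ch + 1
def nF : PForest → Nat
  | .nil => 0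
  | .cons t f => nT t + nF f
end

mutual
def depthT : PTree → Nat
  | .mk _ _ ch _ => depthF ch + 1
def depthF : PForest → Nat
  | .nil => 0
  | .cons t f => max (depthT t) (depthF f)
end

mutual
def WFT : PTree → Prop
  | .mk c m ch md => md.length = m.toNat ∧ lenF ch = c.toNat ∧ WFF ch
def WFF : PForest → Prop
  | .nil => True
  | .cons t f => WFT t ∧ WFF f
end

theorem lenF_eq_zero {f : PForest} (h : lenF f = 0) : f = .nil := by
  cases f with
  | nil => rfl
  | cons t f => simp [lenF] at h

theorem valsF_length : ∀ (f : PForest), (valsF f).length = lenF f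
  | .nil => by simp [valsF, lenF]
  | .cons t f => by simp [valsF, lenF, valsF_length f]

theorem popListA_rev (l : List Int) : ∀ (rr : List Int),
    popListA l.length (rr ++ l.reverse) = some (l, rr) := by
  induction l with
  | nil => intro rr; simp [popListA]
  | cons a l ih =>
    intro rr
    have e1 : rr ++ (a :: l).reverse = (rr ++ l.reverse) ++ [a] := by simp
    simp only [List.length_cons, popListA, e1, PySem.List.pop?_last, ih]

theorem popSumA_rev (l : List Int) : ∀ (rr : List Int) (acc : Int),
    popSumA l.length (rr ++ l.reverse) acc = some (l.foldl (fun x y => x + y) acc, rr) := by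
  induction l with
  | nil => intro rr acc; simp [popSumA]
  | cons a l ih =>
    intro rr acc
    have e1 : rr ++ (a :: l).reverse = (rr ++ l.reverse) ++ [a] := by simp
    simp only [List.length_cons, popSumA, e1, PySem.List.pop?_last, ih, List.foldl_cons]

mutual
theorem LA_T (t : PTree) (hw : WFT t) : ∀ (fuel : Nat) (rr : List Int), depthT t < fuel →
    solveA fuel (rr ++ (encT t).reverse) = some (valT t, rr) := by
  obtain ⟨c, m, ch, md⟩ := t
  obtain ⟨hm, hc, hwf⟩ := hw
  intro fuel rr hf
  cases fuel with
  | zero => omega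
  | succ F =>
    have e1 : rr ++ (encT (.mk c m ch md)).reverse
        = ((rr ++ md.reverse ++ (encF ch).reverse ++ [m]) ++ [c]) := by
      simp [encT]
    rw [e1, solveA, PySem.List.pop?_last]
    dsimp only
    rw [PySem.List.pop?_last]
    dsimp only
    by_cases hc0 : c = 0
    · subst hc0
      obtain rfl : ch = PForest.nil := lenF_eq_zero (by simpa using hc)
      rw [if_pos rfl, ← hm]
      simp only [encF, List.reverse_nil, List.append_nil]
      rw [popSumA_rev]
      simp [valT]
    · rw [if_neg hc0]
      have hch : childrenA F c.toNat (rr ++ md.reverse ++ (encF ch).reverse)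
          = some (valsF ch, rr ++ md.reverse) := by
        rw [← hc]
        exact LA_F ch hwf F (rr ++ md.reverse) (by simp [depthT] at hf; omega)
      rw [hch]
      dsimp only
      rw [← hm, popListA_rev]
      dsimp only
      simp [valT, hc0]
theorem LA_F (f : PForest) (hw : WFF f) : ∀ (fuel : Nat) (rr : List Int), depthF f < fuel →
    childrenA fuel (lenF f) (rr ++ (encF f).reverse) = some (valsF f, rr) := by
  cases f with
  | nil => intro fuel rr _; simp [lenF, encF, childrenA, valsF]
  | cons t f =>
    intro fuel rr hf
    have hdt : depthT t < fuel := by simp [depthF] at hf; omega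
    have hdf : depthF f < fuel := by simp [depthF] at hf; omega
    have e1 : rr ++ (encF (.cons t f)).reverse
        = ((rr ++ (encF f).reverse) ++ (encT t).reverse) := by simp [encF]
    rw [lenF, e1, childrenA, LA_T t hw.1 fuel (rr ++ (encF f).reverse) hdt]
    dsimp only
    rw [LA_F f hw.2 fuel rr hdf]
    dsimp only
    simp [valsF]
end

-- B-side machine lemmas
def stepB (fuel : Nat) : Option (Int ⊕ (FrameB × List Int × List FrameB)) → Option Int
  | none => none
  | some (.inl v) => some v
  | some (.inr (f, r, s)) => runB fuel r (f :: s)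

theorem runB_cons (fuel : Nat) (c m : Int) (r2 : List Int) (stack : List FrameB) :
    runB (fuel+1) (c :: m :: r2) stack = stepB fuel (completeB (c, m, []) r2 stack) := by
  cases h : completeB (c, m, []) r2 stack with
  | none => simp [runB, stepB, h]
  | some v =>
    cases v with
    | inl w => simp [runB, stepB, h]
    | inr st => obtain ⟨f, r, s⟩ := st; simp [runB, stepB, h]

theorem readEntB_append (md : List Int) : ∀ (rest : List Int),
    readEntB md.length (md ++ rest) = some (md, rest) := by
  induction md with
  | nil => intro rest; simp [readEntB]
  | cons a md ih => intro rest; simp only [List.length_cons, readEntB, List.cons_append, ih]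

-- finishing a node: reading its metadata yields exactly its tree value
theorem metaValB_spec (c m : Int) (ch : PForest) (md : List Int)
    (hm : md.length = m.toNat) (rest : List Int) :
    readEntB m.toNat (md ++ rest) = some (md, rest)
      ∧ metaValB c (valsF ch) md = valT (.mk c m ch md) := by
  refine ⟨by rw [← hm]; exact readEntB_append md rest, ?_⟩
  by_cases h0 : c = 0
  · subst h0; rw [metaValB, if_pos rfl, valT, if_pos rfl]
  · rw [metaValB, if_neg h0, valT, if_neg h0]

-- a finished node's frame passes the completion test: c ≤ len(valsF ch) = c.toNat
theorem completion_holds (c : Int) (ch : PForest) (hc : lenF ch = c.toNat) :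
    c ≤ ((valsF ch).length : Int) := by
  rw [valsF_length, hc]
  exact Int.self_le_toNat c

def chOf : PTree → PForest | .mk _ _ ch _ => ch
def cOf : PTree → Int | .mk c _ _ _ => c
def mOf : PTree → Int | .mk _ m _ _ => m
def metaOf : PTree → List Int | .mk _ _ _ md => md

mutual
theorem ML_T (t : PTree) (hw : WFT t) : ∀ (fuel : Nat) (rest : List Int) (stack : List FrameB),
    runB (nT t + fuel) (encT t ++ rest) stack
      = stepB fuel (completeB (cOf t, mOf t, valsF (chOf t)) (metaOf t ++ rest) stack) := by
  obtain ⟨c, m, ch, md⟩ := t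
  obtain ⟨hm, hc, hwf⟩ := hw
  intro fuel rest stack
  have en : nT (.mk c m ch md) + fuel = (nF ch + fuel) + 1 := by simp [nT]; omega
  have e1 : encT (.mk c m ch md) ++ rest = c :: m :: (encF ch ++ (md ++ rest)) := by
    simp [encT]
  rw [en, e1, runB_cons]
  by_cases hc0 : c ≤ 0
  · have hchn : lenF ch = 0 := by omega
    obtain rfl : ch = PForest.nil := lenF_eq_zero hchn
    simp only [nF, Nat.zero_add, encF, List.nil_append, valsF, chOf, cOf, mOf, metaOf]
  · have hpos : 0 < c := by omega
    have hlen : (lenF ch : Int) = c := by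
      rw [hc]; exact Int.toNat_of_nonneg (le_of_lt hpos)
    have hne : lenF ch ≠ 0 := by
      intro h0; rw [h0] at hlen; omega
    have hframe : completeB (c, m, []) (encF ch ++ (md ++ rest)) stack
        = some (.inr ((c, m, []), encF ch ++ (md ++ rest), stack)) := by
      rw [completeB.eq_def]
      simp only [List.length_nil, Int.natCast_zero, if_neg hc0]
    rw [hframe]
    show runB (nF ch + fuel) (encF ch ++ (md ++ rest)) ((c, m, []) :: stack) = _
    have hml := ML_F ch hwf hne fuel (md ++ rest) stack c m []
      (by rw [← hlen]; simp)
    rw [hml]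
    simp [chOf, cOf, mOf, metaOf]
theorem ML_F (f : PForest) (hw : WFF f) (hne : lenF f ≠ 0) :
    ∀ (fuel : Nat) (rest : List Int) (stack : List FrameB) (c m : Int) (vs : List Int),
    c = ((vs.length + lenF f : Nat) : Int) →
    runB (nF f + fuel) (encF f ++ rest) ((c, m, vs) :: stack)
      = stepB fuel (completeB (c, m, vs ++ valsF f) rest stack) := by
  cases f with
  | nil => exact absurd rfl hne
  | cons t f =>
    intro fuel rest stack c m vs hcv
    obtain ⟨hwt, hwf⟩ := hw
    obtain ⟨tc, tm, tch, tmeta⟩ := t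
    obtain ⟨htm, htc, htwf⟩ := hwt
    have en : nF (.cons (.mk tc tm tch tmeta) f) + fuel = nT (.mk tc tm tch tmeta) + (nF f + fuel) := by
      simp [nF]; omega
    have e1 : encF (.cons (.mk tc tm tch tmeta) f) ++ rest
        = encT (.mk tc tm tch tmeta) ++ (encF f ++ rest) := by simp [encF]
    rw [en, e1, ML_T (.mk tc tm tch tmeta) ⟨htm, htc, htwf⟩ (nF f + fuel)
      (encF f ++ rest) ((c, m, vs) :: stack)]
    obtain ⟨hrd, hmv⟩ := metaValB_spec tc tm tch tmeta htm (encF f ++ rest)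
    have hcomp : completeB (cOf (.mk tc tm tch tmeta), mOf (.mk tc tm tch tmeta),
          valsF (chOf (.mk tc tm tch tmeta))) (metaOf (.mk tc tm tch tmeta) ++ (encF f ++ rest))
          ((c, m, vs) :: stack)
        = completeB (c, m, vs ++ [valT (.mk tc tm tch tmeta)]) (encF f ++ rest) stack := by
      rw [completeB.eq_def]
      simp only [chOf, cOf, mOf, metaOf] at *
      rw [if_pos (completion_holds tc tch htc), hrd]
      dsimp only
      rw [hmv]
    rw [hcomp]
    by_cases hf0 : lenF f = 0
    · obtain rfl : f = PForest.nil := lenF_eq_zero hf0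
      simp only [nF, Nat.zero_add, encF, List.nil_append, valsF]
    · have hlt : ¬ (c ≤ ((vs ++ [valT (.mk tc tm tch tmeta)]).length : Int)) := by
        simp only [List.length_append, List.length_cons, List.length_nil]
        simp [lenF] at hcv
        omega
      have hstep : completeB (c, m, vs ++ [valT (.mk tc tm tch tmeta)]) (encF f ++ rest) stack
          = some (.inr ((c, m, vs ++ [valT (.mk tc tm tch tmeta)]), encF f ++ rest, stack)) := by
        rw [completeB.eq_def]
        simp only [if_neg hlt]
      rw [hstep]
      show runB (nF f + fuel) (encF f ++ rest) ((c, m, vs ++ [valT (.mk tc tm tch tmeta)]) :: stack) = _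
      rw [ML_F f hwf hf0 fuel rest stack c m (vs ++ [valT (.mk tc tm tch tmeta)])
        (by simp only [List.length_append, List.length_cons, List.length_nil]
            simp [lenF] at hcv ⊢; omega)]
      simp [valsF]
end

-- size bounds: fuel node.length + 1 is always enough
mutual
theorem boundsT (t : PTree) : depthT t ≤ (encT t).length ∧ nT t ≤ (encT t).length := by
  obtain ⟨c, m, ch, md⟩ := t
  have h := boundsF ch
  simp [depthT, nT, encT] at *
  omega
theorem boundsF (f : PForest) : depthF f ≤ (encF f).length ∧ nF f ≤ (encF f).length := by
  cases f with
  | nil => simp [depthF, nF, encF]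
  | cons t f =>
    have h1 := boundsT t
    have h2 := boundsF f
    simp [depthF, nF, encF] at *
    omega
end

-- the grammar checker accepts exactly encodings of well-formed trees
theorem scanFWith_sound (st : List Int → Option (List Int))
    (hst : ∀ xs r, st xs = some r → ∃ t, WFT t ∧ xs = encT t ++ r) :
    ∀ (k : Nat) (xs r : List Int), scanFWith st k xs = some r →
      ∃ f, WFF f ∧ lenF f = k ∧ xs = encF f ++ r := by
  intro k
  induction k with
  | zero =>
    intro xs r h
    refine ⟨.nil, trivial, rfl, ?_⟩
    simp [scanFWith] at h; simp [encF, h]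
  | succ k ihk =>
    intro xs r h
    rw [scanFWith] at h
    cases hst' : st xs with
    | none => rw [hst'] at h; simp at h
    | some xs' =>
      rw [hst'] at h
      dsimp only at h
      obtain ⟨t, hwt, hxs⟩ := hst xs xs' hst'
      obtain ⟨f, hwf, hlf, hxs'⟩ := ihk xs' r h
      exact ⟨.cons t f, ⟨hwt, hwf⟩, by simp [lenF, hlf], by simp [encF, hxs, hxs']⟩

theorem scanT_sound (fuel : Nat) :
    ∀ xs r, scanT fuel xs = some r → ∃ t, WFT t ∧ xs = encT t ++ r := by
  induction fuel with
  | zero => intro xs r h; simp [scanT] at h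
  | succ fuel ih =>
    intro xs r h
    match xs with
    | [] => simp [scanT] at h
    | [c] => simp [scanT] at h
    | c :: m :: xs2 =>
      rw [scanT] at h
      cases hsf : scanFWith (scanT fuel) c.toNat xs2 with
      | none => rw [hsf] at h; simp at h
      | some xs3 =>
        rw [hsf] at h
        dsimp only at h
        by_cases hlen : m.toNat ≤ xs3.length
        · rw [if_pos hlen] at h
          obtain ⟨ch, hwf, hlf, hxs2⟩ := scanFWith_sound (scanT fuel) ih c.toNat xs2 xs3 hsf
          refine ⟨.mk c m ch (xs3.take m.toNat), ⟨?_, hlf, hwf⟩, ?_⟩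
          · simp [List.length_take]; omega
          · have : xs3 = xs3.take m.toNat ++ r := by
              have hr : r = xs3.drop m.toNat := by
                simpa using h.symm
              rw [hr]; simp
            simp [encT, hxs2, ← this]
        · rw [if_neg hlen] at h; simp at h

-- ===== VERDICT (by name: the statement is the Claim_ definition above) =====
theorem solve_spec : Claim_equal_solve := by
  intro node _ hpre
  unfold Spec_solve
  unfold Pre_solve at hpre
  rw [Option.isSome_iff_exists] at hpre
  obtain ⟨r, hscan⟩ := hpre
  obtain ⟨t, hwt, henc⟩ := scanT_sound (node.length + 1) node.reverse r hscan
  have hlen : (encT t).length ≤ node.length := by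
    have : node.reverse.length = (encT t).length + r.length := by rw [henc]; simp
    simp at this; omega
  have hb := boundsT t
  -- A's side
  have hnode : node = r.reverse ++ (encT t).reverse := by
    have := congrArg List.reverse henc
    simpa using this
  have hA : solve node = valT t := by
    have hlenr : (r.reverse ++ (encT t).reverse).length = node.length := by
      rw [← hnode]
    rw [solve, hnode, hlenr, LA_T t hwt (node.length + 1) r.reverse (by omega)]
  -- B's side
  have hfuel : node.length + 1 = nT t + (node.length + 1 - nT t) := by omega
  have hB : solve_alt node = valT t := by
    rw [solve_alt, henc, hfuel,
      ML_T t hwt (node.length + 1 - nT t) r []]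
    obtain ⟨c, m, ch, md⟩ := t
    obtain ⟨hm, hc, _⟩ := hwt
    obtain ⟨hrd, hmv⟩ := metaValB_spec c m ch md hm r
    simp only [chOf, cOf, mOf, metaOf] at *
    rw [completeB.eq_def]
    simp only [if_pos (completion_holds c ch hc), hrd]
    rw [hmv]
    rfl
  rw [hA, hB]
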